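-- pv_equiv track=rewrite | github.com/NOMADxzy/tryHard | ccf/201912/p1/main.py | has_pre_7
-- ===== SOURCE A (Python) =====
-- def has_pre_7(x: int) -> bool:
--     mask = 10
--     while mask <= x:
--         i = (x // mask) % 10
--         if i == 7:
--             return True
--         mask *= 10
--     return False
-- ===== SOURCE B (Python) =====
-- def has_pre_7(x: int) -> bool:
--     return x >= 10 and '7' in str(x)[:-1]
-- ===== Notes on version B (the rewrite author's own statement) =====
-- stated objective: idiomatic
-- what changed: B replaces A's arithmetic digit-extraction loop (growing power-of-ten mask with division and modulus) by a string-based check: convert x to its decimal string, drop the last character, and test '7' membership, guarded by x >= 10.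
import Mathlib
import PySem

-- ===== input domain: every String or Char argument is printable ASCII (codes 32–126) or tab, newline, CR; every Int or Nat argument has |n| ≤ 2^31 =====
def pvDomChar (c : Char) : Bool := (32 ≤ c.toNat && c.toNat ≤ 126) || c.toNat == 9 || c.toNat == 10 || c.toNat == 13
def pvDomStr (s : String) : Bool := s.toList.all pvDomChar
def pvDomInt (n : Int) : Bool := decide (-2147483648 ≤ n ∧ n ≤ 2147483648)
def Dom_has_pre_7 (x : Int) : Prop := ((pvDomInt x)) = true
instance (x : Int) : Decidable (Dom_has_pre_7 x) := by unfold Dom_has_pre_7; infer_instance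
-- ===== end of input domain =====

-- B checks for a '7' in the decimal string of x with the last character dropped,
-- instead of A's arithmetic mask loop; objective: idiomatic.

-- ===== PORT A =====
-- A's while loop; fuel only makes the recursion total (the loop runs at most
-- log10 x + 1 ≤ x.toNat + 1 times, proved in fuel-sufficiency below).
def has_pre_7_loop (x mask : Int) : Nat → Bool
  | 0 => false
  | fuel + 1 =>
    if mask ≤ x then
      if PySem.Int.mod (PySem.Int.floordiv x mask) 10 == 7 then true
      else has_pre_7_loop x (mask * 10) fuel
    else false

def has_pre_7 (x : Int) : Bool := has_pre_7_loop x 10 (x.toNat + 1)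

-- ===== PORT B =====
-- 'x >= 10 and "7" in str(x)[:-1]'
def has_pre_7_alt (x : Int) : Bool :=
  decide (10 ≤ x) && PySem.Str.isIn "7" (PySem.Str.slice (PySem.Int.toStr x) none (some (-1)))

-- ===== PRECONDITION & SPEC =====
def Spec_has_pre_7 (x : Int) (out : Bool) : Prop := out = has_pre_7_alt x
instance (x : Int) (out : Bool) : Decidable (Spec_has_pre_7 x out) := by unfold Spec_has_pre_7; infer_instance

-- ===== CLAIM (what is proved, stated in full; the proofs are below) =====
def Claim_equal_has_pre_7 : Prop := ∀ (x : Int), Dom_has_pre_7 x → Spec_has_pre_7 x (has_pre_7 x)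

-- ===== LEMMAS AND PROOFS =====

-- Structural form of Nat.toDigits 10: most-significant digit first.
def myDigits (n : Nat) : List Char :=
  if _h : n < 10 then [Nat.digitChar n]
  else myDigits (n / 10) ++ [Nat.digitChar (n % 10)]
decreasing_by exact Nat.div_lt_self (by omega) (by omega)

theorem toDigitsCore_eq : ∀ (fuel n : Nat), n < fuel → ∀ ds : List Char,
    Nat.toDigitsCore 10 fuel n ds = myDigits n ++ ds := by
  intro fuel
  induction fuel with
  | zero => omega
  | succ fuel ih =>
    intro n hn ds
    rw [Nat.toDigitsCore, myDigits]
    by_cases h : n < 10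
    · simp only [Nat.div_eq_of_lt h, dif_pos h, Nat.mod_eq_of_lt h]
      rfl
    · have hne : n / 10 ≠ 0 := by
        intro h0; exact h (by omega : n < 10) -- placeholder
      simp only [dif_neg h, if_neg hne]
      rw [ih (n / 10) (by
        have := Nat.div_lt_self (show 0 < n by omega) (show 1 < 10 by omega)
        omega) (Nat.digitChar (n % 10) :: ds)]
      simp

theorem toDigits_eq (n : Nat) : Nat.toDigits 10 n = myDigits n := by
  rw [Nat.toDigits, toDigitsCore_eq (n + 1) n (by omega) []]
  simp

-- Digit-scan reading of A's loop (proof helper only).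
def scan7 (y : Int) : Bool :=
  if 0 < y then
    if PySem.Int.mod y 10 == 7 then true
    else scan7 (PySem.Int.floordiv y 10)
  else false
termination_by y.toNat
decreasing_by
  have h1 := (PySem.Int.floordiv_lt_iff_lt_mul (a := y) (b := 10) (q := y) (by omega)).mpr (by omega)
  omega

theorem scan7_nonpos {y : Int} (h : ¬ 0 < y) : scan7 y = false := by
  rw [scan7]; simp [h]

theorem floordiv_floordiv (x mask : Int) (hm : 0 < mask) :
    PySem.Int.floordiv (PySem.Int.floordiv x mask) 10 = PySem.Int.floordiv x (mask * 10) := by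
  rw [PySem.Int.floordiv_eq_ediv_of_pos hm,
      PySem.Int.floordiv_eq_ediv_of_pos (by omega : (0:Int) < 10),
      PySem.Int.floordiv_eq_ediv_of_pos (by positivity)]
  exact Int.ediv_ediv_of_nonneg (by omega)

theorem loop_eq_scan7 (fuel : Nat) :
    ∀ (x mask : Int), 0 < mask → x < mask * 10 ^ fuel →
      has_pre_7_loop x mask fuel = scan7 (PySem.Int.floordiv x mask) := by
  induction fuel with
  | zero =>
    intro x mask hm hx
    simp only [pow_zero, mul_one] at hx
    rw [has_pre_7_loop, scan7_nonpos]
    have := (PySem.Int.floordiv_lt_iff_lt_mul (a := x) (b := mask) (q := 1) hm).mpr (by omega)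
    omega
  | succ fuel ih =>
    intro x mask hm hx
    rw [has_pre_7_loop]
    by_cases hle : mask ≤ x
    · have hq : 1 ≤ PySem.Int.floordiv x mask :=
        (PySem.Int.le_floordiv_iff_mul_le (q := 1) hm).mpr (by omega)
      rw [scan7, if_pos (show 0 < PySem.Int.floordiv x mask by omega), if_pos hle]
      by_cases h7 : (PySem.Int.mod (PySem.Int.floordiv x mask) 10 == 7) = true
      · rw [if_pos h7, if_pos h7]
      · rw [if_neg h7, if_neg h7, floordiv_floordiv x mask hm]
        exact ih x (mask * 10) (by positivity) (by rw [mul_assoc]; rw [pow_succ'] at hx; exact hx)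
    · simp only [hle, if_false]
      rw [scan7_nonpos]
      have := (PySem.Int.floordiv_lt_iff_lt_mul (a := x) (b := mask) (q := 1) hm).mpr (by omega)
      omega

theorem fuel_big (x : Int) : x < 10 * 10 ^ (x.toNat + 1) := by
  have h1 : (x.toNat : Int) < (10:Int) ^ (x.toNat + 1) := by
    have := Nat.lt_pow_self (by omega : 1 < 10) (n := x.toNat + 1)
    calc (x.toNat : Int) ≤ ((x.toNat + 1 : Nat) : Int) := by push_cast; omega
      _ < ((10 ^ (x.toNat + 1) : Nat) : Int) := by exact_mod_cast this
      _ = (10:Int) ^ (x.toNat + 1) := by push_cast; ring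
  have h2 : (0:Int) < 10 ^ (x.toNat + 1) := by positivity
  have h3 : x ≤ (x.toNat : Int) := Int.self_le_toNat x
  nlinarith

theorem digitChar_eq_seven_iff (d : Nat) (hd : d < 10) : Nat.digitChar d = '7' ↔ d = 7 := by
  interval_cases d <;> simp [Nat.digitChar]

-- scan7 over a Nat is '7'-membership in its decimal digits.
theorem scan7_eq_mem (n : Nat) : scan7 (n : Int) = decide ('7' ∈ myDigits n) := by
  induction n using Nat.strong_induction_on with
  | _ n ih =>
    rw [scan7, myDigits]
    by_cases hz : n = 0
    · subst hz; simp [Nat.digitChar]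
    · have hpos : (0 : Int) < (n : Int) := by exact_mod_cast Nat.pos_of_ne_zero hz
      rw [if_pos hpos]
      have hmod : PySem.Int.mod (n : Int) 10 = ((n % 10 : Nat) : Int) := by
        exact_mod_cast PySem.Int.mod_natCast n 10
      have hdiv : PySem.Int.floordiv (n : Int) 10 = ((n / 10 : Nat) : Int) := by
        exact_mod_cast PySem.Int.floordiv_natCast n 10
      by_cases h : n < 10
      · rw [dif_pos h]
        have hmn : n % 10 = n := Nat.mod_eq_of_lt h
        by_cases h7 : n = 7
        · subst h7
          rw [if_pos (by rw [hmod]; rfl)]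
          decide
        · rw [if_neg (by rw [hmod, hmn]; simp only [beq_iff_eq]; omega), hdiv,
              Nat.div_eq_of_lt h, Nat.cast_zero, scan7_nonpos (by omega)]
          have hne : Nat.digitChar n ≠ '7' := fun hc => h7 ((digitChar_eq_seven_iff n h).mp hc)
          simp [Ne.symm hne]
      · rw [dif_neg h]
        by_cases h7 : n % 10 = 7
        · rw [if_pos (by rw [hmod, h7]; rfl)]
          have hc7 : Nat.digitChar (n % 10) = '7' := by rw [h7]; rfl
          simp [hc7]
        · rw [if_neg (by rw [hmod]; simp only [beq_iff_eq]; omega), hdiv,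
              ih (n / 10) (Nat.div_lt_self (by omega) (by omega))]
          have hne : Nat.digitChar (n % 10) ≠ '7' := by
            intro hc; exact h7 ((digitChar_eq_seven_iff _ (Nat.mod_lt n (by omega))).mp hc)
          simp only [List.mem_append, List.mem_singleton]
          by_cases hm : '7' ∈ myDigits (n / 10) <;> simp [hm, Ne.symm hne]

-- B unfolded to membership in the dropped-last digit list.
theorem isIn_singleton (c : Char) (l : List Char) :
    PySem.Chars.isIn [c] l = decide (c ∈ l) := by
  by_cases h : c ∈ l
  · simp [h, (PySem.Chars.isIn_iff_infix _ _).mpr ((List.singleton_infix_iff c l).mpr h)]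
  · simp only [h, decide_false]
    rw [← Bool.not_eq_true]
    intro hc
    exact h ((List.singleton_infix_iff c l).mp ((PySem.Chars.isIn_iff_infix _ _).mp hc))

theorem alt_eq (x : Int) :
    has_pre_7_alt x = (decide (10 ≤ x) && decide ('7' ∈ (PySem.Int.toChars x).dropLast)) := by
  unfold has_pre_7_alt
  rw [PySem.Str.isIn]
  rw [show (PySem.Str.slice (PySem.Int.toStr x) none (some (-1))).toList
        = (PySem.Int.toChars x).dropLast by
      simp [PySem.Str.slice, PySem.List.slice_to_neg_one, PySem.Int.toList_toStr]]
  rw [show ("7" : String).toList = ['7'] from by decide]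
  rw [isIn_singleton]

-- ===== VERDICT (by name: the statement is the Claim_ definition above) =====
theorem has_pre_7_spec : Claim_equal_has_pre_7 := by
  intro x _
  unfold Spec_has_pre_7
  rw [alt_eq]
  by_cases hx : 10 ≤ x
  · have hA : has_pre_7 x = scan7 (PySem.Int.floordiv x 10) := by
      unfold has_pre_7
      exact loop_eq_scan7 (x.toNat + 1) x 10 (by omega) (fuel_big x)
    obtain ⟨n, hn⟩ : ∃ n : Nat, x = (n : Int) := ⟨x.toNat, by omega⟩
    subst hn
    have hdiv : PySem.Int.floordiv (n : Int) 10 = ((n / 10 : Nat) : Int) := by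
      exact_mod_cast PySem.Int.floordiv_natCast n 10
    rw [hA, hdiv, scan7_eq_mem]
    have hten : (10:Nat) ≤ n := by exact_mod_cast hx
    have : PySem.Int.toChars (n : Int) = myDigits n := by
      rw [PySem.Int.toChars]
      rw [if_neg (by omega)]
      simp [toDigits_eq]
    rw [this, show myDigits n = myDigits (n / 10) ++ [Nat.digitChar (n % 10)] from by
      rw [myDigits]; rw [dif_neg (by omega)]]
    simp [hx]
  · have hA : has_pre_7 x = false := by
      unfold has_pre_7
      rw [has_pre_7_loop]
      simp [hx]
    simp [hA, hx]
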